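-- pv_equiv track=rewrite | github.com/zhangquan1015/cluster-security-risk-analyze-system | Script/nvdparser_1.py | filter_remediation
-- ===== SOURCE A (Python) =====
-- def filter_remediation(patchs):
--     if len(patchs) == 0:
--         return
--     fix = "Workaround"
--     for patch in patchs:
--         if "Advisory" in patch[0]:
--             if "Offical" in patch[0]:
--                 return "Official Fix"
--             fix = "Third Party Fix"
--     return fix
-- ===== SOURCE B (Python) =====
-- def filter_remediation(patchs):
--     if not patchs:
--         return None
--     if any("Advisory" in p[0] and "Offical" in p[0] for p in patchs):
--         return "Official Fix"
--     if any("Advisory" in p[0] for p in patchs):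
--         return "Third Party Fix"
--     return "Workaround"
-- ===== Notes on version B (the rewrite author's own statement) =====
-- stated objective: simpler
-- what changed: Replaces A's single stateful loop with its mutable 'fix' accumulator and mid-loop early return by two independent existence scans (any(...)) over the list, one per remediation category.
import Mathlib
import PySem

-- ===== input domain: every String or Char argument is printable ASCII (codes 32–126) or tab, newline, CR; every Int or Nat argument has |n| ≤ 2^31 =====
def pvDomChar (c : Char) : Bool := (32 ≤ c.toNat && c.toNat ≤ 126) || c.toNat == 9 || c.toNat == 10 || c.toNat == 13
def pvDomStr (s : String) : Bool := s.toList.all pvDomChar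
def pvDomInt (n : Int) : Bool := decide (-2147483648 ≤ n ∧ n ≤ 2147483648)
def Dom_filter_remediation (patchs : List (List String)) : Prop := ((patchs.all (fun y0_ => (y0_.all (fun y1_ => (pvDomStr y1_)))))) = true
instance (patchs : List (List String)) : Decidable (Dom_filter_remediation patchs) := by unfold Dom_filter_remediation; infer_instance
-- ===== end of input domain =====

-- B differs from A only in decomposition: two independent existence scans instead of one stateful loop; return values proved equal on Pre_.

-- ===== PORT A =====
-- A's loop with the mutable 'fix' accumulator and early return; an empty patch makes
-- patch[0] raise IndexError, rendered as 'none' and excluded by Pre_.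
def filterRemLoop : List (List String) → String → Option String
  | [], fix => some fix
  | p :: rest, fix =>
    match p with
    | [] => none  -- IndexError (outside Pre_)
    | s :: _ =>
      if PySem.Str.isIn "Advisory" s then
        if PySem.Str.isIn "Offical" s then some "Official Fix"
        else filterRemLoop rest "Third Party Fix"
      else filterRemLoop rest fix

def filter_remediation (patchs : List (List String)) : Option String :=
  if patchs.length = 0 then none
  else filterRemLoop patchs "Workaround"

-- ===== PORT B =====
-- Source B's any(...) generators; p[0] is p.headD "" (Pre_ guarantees the scans never reach an empty patch).
def officialB (p : List String) : Bool :=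
  PySem.Str.isIn "Advisory" (p.headD "") && PySem.Str.isIn "Offical" (p.headD "")

def advisoryB (p : List String) : Bool :=
  PySem.Str.isIn "Advisory" (p.headD "")

def filter_remediation_alt (patchs : List (List String)) : Option String :=
  if patchs.isEmpty then none
  else if patchs.any officialB then some "Official Fix"
  else if patchs.any advisoryB then some "Third Party Fix"
  else some "Workaround"

-- ===== PRECONDITION & SPEC =====
-- Pre_ excludes exactly the inputs on which A raises IndexError: an empty patch list
-- occurring with no 'Advisory'+'Offical' patch strictly before it.
def Pre_filter_remediation (patchs : List (List String)) : Prop :=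
  ∀ i ∈ List.range patchs.length, patchs.getD i [] = [] →
    ∃ j ∈ List.range i, patchs.getD j [] ≠ [] ∧ officialB (patchs.getD j []) = true
instance (patchs : List (List String)) : Decidable (Pre_filter_remediation patchs) := by
  unfold Pre_filter_remediation; infer_instance

def pvWitness_filter_remediation : List (List String) := [["Advisory note"], ["none"]]

def Spec_filter_remediation (patchs : List (List String)) (out : Option String) : Prop := out = filter_remediation_alt patchs
instance (patchs : List (List String)) (out : Option String) : Decidable (Spec_filter_remediation patchs out) := by unfold Spec_filter_remediation; infer_instance

-- ===== CLAIM (what is proved, stated in full; the proofs are below) =====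
def Claim_equal_filter_remediation : Prop := ∀ (patchs : List (List String)), Dom_filter_remediation patchs → Pre_filter_remediation patchs → Spec_filter_remediation patchs (filter_remediation patchs)

-- ===== LEMMAS AND PROOFS =====

-- Pre_ on a cons: the head is nonempty unless vacuous, and if the head is not an official
-- fix the tail still satisfies Pre_.
theorem pre_head {p : List String} {rest : List (List String)}
    (h : Pre_filter_remediation (p :: rest)) : p ≠ [] := by
  intro hp
  have := h 0 (by simp [List.mem_range]) (by simpa using hp)
  rcases this with ⟨j, hj, _⟩
  simp at hj

theorem pre_tail {p : List String} {rest : List (List String)}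
    (h : Pre_filter_remediation (p :: rest)) (hnoff : officialB p = false) :
    Pre_filter_remediation rest := by
  intro i hi he
  have hi' : i < rest.length := by simpa [List.mem_range] using hi
  have := h (i + 1) (by simp [List.mem_range]; omega) (by simpa using he)
  rcases this with ⟨j, hj, hne, hoff⟩
  have hj' : j < i + 1 := by simpa [List.mem_range] using hj
  match j, hj' with
  | 0, _ =>
    simp at hne hoff
    rw [hnoff] at hoff; exact absurd hoff (by simp)
  | j' + 1, hj'' =>
    refine ⟨j', by simp [List.mem_range]; omega, ?_, ?_⟩
    · simpa using hne
    · simpa using hoff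

-- Characterisation of A's loop under Pre_: it computes B's two existence scans,
-- with the accumulator as the default.
theorem loop_char (patchs : List (List String)) (fix : String)
    (h : Pre_filter_remediation patchs) :
    filterRemLoop patchs fix =
      if patchs.any officialB then some "Official Fix"
      else if patchs.any advisoryB then some "Third Party Fix" else some fix := by
  induction patchs generalizing fix with
  | nil => simp [filterRemLoop]
  | cons p rest ih =>
    have hne : p ≠ [] := pre_head h
    match p, hne with
    | s :: tl, _ =>
      by_cases hadv : PySem.Chars.isIn ['A','d','v','i','s','o','r','y'] s.toList = true
      · by_cases hoff : PySem.Chars.isIn ['O','f','f','i','c','a','l'] s.toList = true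
        · simp [filterRemLoop, PySem.Str.isIn, officialB, hadv, hoff]
        · have hnoff : officialB (s :: tl) = false := by
            simp [officialB, PySem.Str.isIn, hoff]
          have hpre := pre_tail h hnoff
          rw [show filterRemLoop ((s :: tl) :: rest) fix
              = filterRemLoop rest "Third Party Fix" by
            simp [filterRemLoop, PySem.Str.isIn, hadv, hoff]]
          rw [ih _ hpre]
          simp [List.any_cons, hnoff, advisoryB, PySem.Str.isIn, hadv]
      · have hnoff : officialB (s :: tl) = false := by
          simp [officialB, PySem.Str.isIn, hadv]
        have hpre := pre_tail h hnoff
        rw [show filterRemLoop ((s :: tl) :: rest) fix = filterRemLoop rest fix by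
          simp [filterRemLoop, PySem.Str.isIn, hadv]]
        rw [ih _ hpre]
        simp [List.any_cons, hnoff, advisoryB, PySem.Str.isIn, hadv]

-- ===== VERDICT (by name: the statement is the Claim_ definition above) =====
theorem filter_remediation_spec : Claim_equal_filter_remediation := by
  intro patchs _ hpre
  unfold Spec_filter_remediation filter_remediation filter_remediation_alt
  match patchs with
  | [] => simp
  | p :: rest =>
    rw [loop_char _ _ hpre]
    simp
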